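-- pv_equiv track=rewrite | github.com/pratshow/CS4412-TSP-P6 | TSPSolver.py | twoOptSwap
-- ===== SOURCE A (Python) =====
-- def twoOptSwap(route = None, startInclusive = -1, stopInclusive = -1):
-- 	assert(route is not None)
-- 	assert(startInclusive >= 0 and startInclusive < len(route) - 1)
-- 	assert(stopInclusive > startInclusive and stopInclusive <= len(route))
--
-- 	returnRoute = []
-- 	# Adds the first part of the route onto the return route.
-- 	for i in range(startInclusive):
-- 		returnRoute.append(route[i])
-- 	# Reverses the middle section of the route, and adds to the return route.
-- 	for i in range(stopInclusive, startInclusive - 1, -1):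
-- 		returnRoute.append(route[i])
-- 	# Adds the last part of the route onto the return route.
-- 	for i in range(stopInclusive + 1, len(route)):
-- 		returnRoute.append(route[i])
--
-- 	return returnRoute
-- ===== SOURCE B (Python) =====
-- def twoOptSwap(route = None, startInclusive = -1, stopInclusive = -1):
-- 	assert(route is not None)
-- 	assert(startInclusive >= 0 and startInclusive < len(route) - 1)
-- 	assert(stopInclusive > startInclusive and stopInclusive <= len(route))
--
-- 	# Copy the route and reverse the segment [startInclusive, stopInclusive]
-- 	# in place with two converging pointers.
-- 	returnRoute = list(route)
-- 	left, right = startInclusive, stopInclusive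
-- 	while left < right:
-- 		returnRoute[left], returnRoute[right] = returnRoute[right], returnRoute[left]
-- 		left += 1
-- 		right -= 1
-- 	return returnRoute
-- ===== Notes on version B (the rewrite author's own statement) =====
-- stated objective: alternative
-- what changed: Replaces A's three sequential copy loops building a new list with a single copy followed by an in-place two-pointer swap loop that reverses the middle segment.
import Mathlib
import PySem

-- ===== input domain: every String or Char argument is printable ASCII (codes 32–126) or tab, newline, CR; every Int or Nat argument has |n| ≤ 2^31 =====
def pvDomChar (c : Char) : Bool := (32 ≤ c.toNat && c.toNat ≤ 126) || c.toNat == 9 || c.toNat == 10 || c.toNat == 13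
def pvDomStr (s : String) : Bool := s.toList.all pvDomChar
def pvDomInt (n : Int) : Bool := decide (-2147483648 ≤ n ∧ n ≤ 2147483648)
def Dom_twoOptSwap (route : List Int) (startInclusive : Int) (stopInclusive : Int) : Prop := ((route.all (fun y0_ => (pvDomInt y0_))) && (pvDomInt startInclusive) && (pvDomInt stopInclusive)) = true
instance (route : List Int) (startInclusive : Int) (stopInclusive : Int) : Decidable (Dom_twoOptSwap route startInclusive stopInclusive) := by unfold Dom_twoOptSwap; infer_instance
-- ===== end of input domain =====

-- B replaces A's three copy loops with copy-then-in-place two-pointer segment reversal (objective: alternative decomposition, same cost).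

-- ===== PORT A =====
-- three loops, each 'returnRoute.append(route[i])' over its range
def twoOptSwap (route : List Int) (startInclusive : Int) (stopInclusive : Int) : List Int :=
  let r1 := (PySem.List.pyRange 0 startInclusive 1).foldl
    (fun acc i => acc ++ [PySem.List.pyGetD route i 0]) []
  let r2 := (PySem.List.pyRange stopInclusive (startInclusive - 1) (-1)).foldl
    (fun acc i => acc ++ [PySem.List.pyGetD route i 0]) r1
  let r3 := (PySem.List.pyRange (stopInclusive + 1) (route.length : Int) 1).foldl
    (fun acc i => acc ++ [PySem.List.pyGetD route i 0]) r2
  r3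

-- ===== PORT B =====
-- 'while left < right: swap; left += 1; right -= 1' on the copied route
def swapLoopB (xs : List Int) (left right : Int) : List Int :=
  if left < right then
    let a := PySem.List.pyGetD xs left 0   -- returnRoute[right], returnRoute[left] read first
    let b := PySem.List.pyGetD xs right 0
    swapLoopB (PySem.List.pySetD (PySem.List.pySetD xs left b) right a) (left + 1) (right - 1)
  else xs
termination_by (right - left).toNat
decreasing_by omega

def twoOptSwap_alt (route : List Int) (startInclusive : Int) (stopInclusive : Int) : List Int :=
  swapLoopB route startInclusive stopInclusive

-- ===== PRECONDITION & SPEC =====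
-- Pre_ excludes exactly the inputs where the Python A raises: failed asserts
-- (startInclusive/stopInclusive out of order or range) and stopInclusive = len(route),
-- where route[stopInclusive] raises IndexError (B raises there too).
def Pre_twoOptSwap (route : List Int) (startInclusive : Int) (stopInclusive : Int) : Prop :=
  0 ≤ startInclusive ∧ startInclusive < (route.length : Int) - 1 ∧
    startInclusive < stopInclusive ∧ stopInclusive < (route.length : Int)
instance (route : List Int) (startInclusive : Int) (stopInclusive : Int) : Decidable (Pre_twoOptSwap route startInclusive stopInclusive) := by unfold Pre_twoOptSwap; infer_instance

def pvWitness_twoOptSwap : List Int × Int × Int := ([1, 2, 3, 4], 0, 2)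

def Spec_twoOptSwap (route : List Int) (startInclusive : Int) (stopInclusive : Int) (out : List Int) : Prop := out = twoOptSwap_alt route startInclusive stopInclusive
instance (route : List Int) (startInclusive : Int) (stopInclusive : Int) (out : List Int) : Decidable (Spec_twoOptSwap route startInclusive stopInclusive out) := by unfold Spec_twoOptSwap; infer_instance

-- ===== CLAIM (what is proved, stated in full; the proofs are below) =====
def Claim_equal_twoOptSwap : Prop := ∀ (route : List Int) (startInclusive : Int) (stopInclusive : Int), Dom_twoOptSwap route startInclusive stopInclusive → Pre_twoOptSwap route startInclusive stopInclusive → Spec_twoOptSwap route startInclusive stopInclusive (twoOptSwap route startInclusive stopInclusive)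

-- ===== LEMMAS AND PROOFS =====

-- A's append loop over range(a, b) copies the segment route[a:b].
lemma segMap (route : List Int) : ∀ (k a b : Nat), b - a ≤ k → b ≤ route.length →
    (PySem.List.pyRange (a : Int) (b : Int) 1).map (fun i => PySem.List.pyGetD route i 0)
      = (route.drop a).take (b - a) := by
  intro k
  induction k with
  | zero =>
    intro a b h hb
    have hba : b ≤ a := by omega
    rw [PySem.List.pyRange_one_eq_nil (by exact_mod_cast hba)]
    simp [Nat.sub_eq_zero_of_le hba]
  | succ k ih =>
    intro a b h hb
    by_cases hab : a < b
    · rw [PySem.List.pyRange_one_cons (by exact_mod_cast hab)]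
      have ha : a < route.length := by omega
      have hcast : ((a : Int) + 1) = ((a + 1 : Nat) : Int) := by push_cast; ring
      rw [List.map_cons, hcast, ih (a + 1) b (by omega) hb]
      simp only [PySem.List.pyGetD_natCast]
      rw [List.getD_eq_getElem route 0 ha, List.drop_eq_getElem_cons ha]
      have hsub : b - a = (b - (a + 1)) + 1 := by omega
      rw [hsub, List.take_succ_cons]
    · have hba : b ≤ a := by omega
      rw [PySem.List.pyRange_one_eq_nil (by exact_mod_cast hba)]
      simp [Nat.sub_eq_zero_of_le hba]

lemma drop_take_set (ys : List Int) (i : Nat) (v : Int) (k m : Nat) (h : k + m ≤ i) :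
    ((ys.set i v).drop k).take m = (ys.drop k).take m := by
  rw [List.take_drop, List.take_drop, List.take_set_of_le (by omega)]

lemma seg_id (xs : List Int) (l r : Nat) (h1 : r ≤ l) (h2 : l ≤ r + 1) (hr : r < xs.length) :
    xs = xs.take l ++ ((xs.drop l).take (r + 1 - l)).reverse ++ xs.drop (r + 1) := by
  rcases (by omega : l = r ∨ l = r + 1) with rfl | rfl
  · have h3 : (xs.drop l).take (l + 1 - l) = [xs[l]] := by
      rw [List.drop_eq_getElem_cons hr, show l + 1 - l = 1 from by omega]
      rfl
    rw [h3]
    conv_lhs => rw [← List.take_append_drop l xs, List.drop_eq_getElem_cons hr]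
    simp
  · simp [List.take_append_drop]

-- B's converging-pointer loop reverses the segment [l, r] in place.
lemma swapLoopB_eq : ∀ (k : Nat) (xs : List Int) (l r : Nat), r - l ≤ k → l ≤ r + 1 →
    r < xs.length →
    swapLoopB xs (l : Int) (r : Int)
      = xs.take l ++ ((xs.drop l).take (r + 1 - l)).reverse ++ xs.drop (r + 1) := by
  intro k
  induction k with
  | zero =>
    intro xs l r h hlr hr
    rw [swapLoopB, if_neg (by exact_mod_cast (by omega : ¬ l < r))]
    exact seg_id xs l r (by omega) hlr hr
  | succ k ih =>
    intro xs l r h hlr hr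
    by_cases hlt : l < r
    · have hl : l < xs.length := by omega
      rw [swapLoopB, if_pos (by exact_mod_cast hlt)]
      simp only [PySem.List.pyGetD_natCast, PySem.List.pySetD_natCast,
        List.getD_eq_getElem xs 0 hl, List.getD_eq_getElem xs 0 hr]
      have hc1 : (l : Int) + 1 = ((l + 1 : Nat) : Int) := by push_cast; ring
      have hc2 : (r : Int) - 1 = ((r - 1 : Nat) : Int) := by omega
      rw [hc1, hc2, ih _ (l + 1) (r - 1) (by omega) (by omega)
        (by simp only [List.length_set]; omega)]
      have hlen : ((xs.set l xs[r]).set r xs[l]).length = xs.length := by simp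
      have eq1 : ((xs.set l xs[r]).set r xs[l]).take (l + 1) = xs.take l ++ [xs[r]] := by
        rw [List.take_set_of_le (by omega), List.take_add_one]
        simp [hl, List.take_set_of_le (le_refl l)]
      have eq2 : ((xs.set l xs[r]).set r xs[l]).drop (r - 1 + 1) = xs[l] :: xs.drop (r + 1) := by
        have hr' : r < ((xs.set l xs[r]).set r xs[l]).length := by omega
        have hstep : r - 1 + 1 = r := by omega
        rw [hstep, List.drop_eq_getElem_cons hr',
          List.getElem_set_self (by simpa using hr),
          List.drop_set_of_lt (by omega), List.drop_set_of_lt (by omega)]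
      have eq3 : (((xs.set l xs[r]).set r xs[l]).drop (l + 1)).take (r - 1 + 1 - (l + 1))
          = (xs.drop (l + 1)).take (r - 1 - l) := by
        have hm : r - 1 + 1 - (l + 1) = r - 1 - l := by omega
        rw [hm, drop_take_set _ _ _ _ _ (by omega), List.drop_set_of_lt (by omega)]
      have eq4 : (xs.drop l).take (r + 1 - l)
          = xs[l] :: ((xs.drop (l + 1)).take (r - 1 - l) ++ [xs[r]]) := by
        rw [List.drop_eq_getElem_cons hl]
        have h1 : r + 1 - l = (r - l) + 1 := by omega
        rw [h1, List.take_succ_cons]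
        have h2 : r - l = (r - 1 - l) + 1 := by omega
        rw [h2, List.take_add_one, List.getElem?_drop]
        have h3 : l + 1 + (r - 1 - l) = r := by omega
        rw [h3, List.getElem?_eq_getElem hr]
        rfl
      rw [eq1, eq2, eq3, eq4]
      simp
    · rw [swapLoopB, if_neg (by exact_mod_cast hlt)]
      exact seg_id xs l r (by omega) hlr hr

-- ===== VERDICT (by name: the statement is the Claim_ definition above) =====
theorem twoOptSwap_spec : Claim_equal_twoOptSwap := by
  intro route startInclusive stopInclusive _ hPre
  obtain ⟨h0, h1, h2, h3⟩ := hPre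
  have hs : startInclusive = ((startInclusive.toNat : Nat) : Int) := by omega
  have ht : stopInclusive = ((stopInclusive.toNat : Nat) : Int) := by omega
  set s := startInclusive.toNat with hsdef
  set t := stopInclusive.toNat with htdef
  have hsn : s + 1 < route.length := by omega
  have hst : s < t := by omega
  have htn : t < route.length := by omega
  unfold Spec_twoOptSwap twoOptSwap twoOptSwap_alt
  rw [hs, ht]
  simp only [PySem.List.foldl_append_singleton_eq_map, List.nil_append]
  have hR1 : PySem.List.pyRange 0 (s : Int) 1
      = PySem.List.pyRange ((0 : Nat) : Int) ((s : Nat) : Int) 1 := by norm_num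
  have e1 : (t : Int) + 1 = ((t + 1 : Nat) : Int) := by push_cast; ring
  have hR2 : PySem.List.pyRange (t : Int) ((s : Int) - 1) (-1)
      = (PySem.List.pyRange ((s : Nat) : Int) ((t + 1 : Nat) : Int) 1).reverse := by
    rw [PySem.List.pyRange_neg_one_eq_reverse,
      show (s : Int) - 1 + 1 = ((s : Nat) : Int) from by ring, e1]
  have hR3 : PySem.List.pyRange ((t : Int) + 1) (route.length : Int) 1
      = PySem.List.pyRange ((t + 1 : Nat) : Int) ((route.length : Nat) : Int) 1 := by
    rw [e1]
  rw [hR1, hR2, hR3, List.map_reverse,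
    segMap route s 0 s (by omega) (by omega),
    segMap route (t + 1) s (t + 1) (by omega) (by omega),
    segMap route route.length (t + 1) route.length (by omega) (le_refl _)]
  rw [swapLoopB_eq (t - s) route s t (le_refl _) (by omega) htn,
    List.take_of_length_le (show (route.drop (t + 1)).length ≤ route.length - (t + 1) by simp)]
  simp
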